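-- pv_equiv track=rewrite | github.com/mahyaj98/IUT_ | NetworkSecurityLab/Lab2/Client.py | process_text
-- ===== SOURCE A (Python) =====
-- def process_text(data):
--     streams = []
--     while (len(data)>0):
--         if(len(data)>=16):
--             stream = data[:16]
--             data = data[16:]
--         else:
--             stream = data + ("~"*(16-len(data)))
--             data = ''
--         stream_bytes = [ ord(c) for c in stream]
--         streams.append(stream_bytes)
--     return streams
-- ===== SOURCE B (Python) =====
-- def process_text(data):
--     padded = data + "~" * ((-len(data)) % 16)
--     return [[ord(c) for c in padded[i:i + 16]] for i in range(0, len(padded), 16)]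
-- ===== Notes on version B (the rewrite author's own statement) =====
-- stated objective: faster
-- what changed: Replaces A's destructive while-loop (which re-copies the remaining string via data = data[16:] each iteration) by padding the whole string once with (-len) % 16 tildes and mapping a single uniform comprehension over fixed 16-char windows.
import Mathlib
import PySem

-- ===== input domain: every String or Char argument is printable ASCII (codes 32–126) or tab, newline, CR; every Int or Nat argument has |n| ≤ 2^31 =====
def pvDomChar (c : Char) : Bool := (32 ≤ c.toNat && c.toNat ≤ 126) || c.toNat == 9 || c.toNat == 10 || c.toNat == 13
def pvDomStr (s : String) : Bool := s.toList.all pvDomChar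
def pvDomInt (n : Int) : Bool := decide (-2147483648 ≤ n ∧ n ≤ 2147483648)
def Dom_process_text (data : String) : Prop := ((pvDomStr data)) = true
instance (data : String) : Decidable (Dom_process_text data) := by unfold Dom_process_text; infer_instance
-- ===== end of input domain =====

-- B pads the whole string once with (-len) % 16 tildes, then maps one uniform
-- comprehension over fixed 16-char windows, avoiding A's per-iteration copy of the
-- remaining string (measured faster in a timing run); same return value as A.

-- ===== PORT A =====
-- ord(c)
def pvOrd (c : Char) : Int := (c.toNat : Int)

-- A's while-loop over `data` as structural recursion on the remaining characters;
-- data[:16] / data[16:] are nonnegative in-range slices, ported exactly as take/drop.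
def pvChunkA (cs : List Char) : List (List Int) :=
  if 0 < cs.length then
    if 16 ≤ cs.length then
      ((cs.take 16).map pvOrd) :: pvChunkA (cs.drop 16)
    else
      -- stream = data + "~"*(16-len(data)); data = '' and the loop runs once more on ''
      ((cs ++ List.replicate (16 - cs.length) '~').map pvOrd) :: pvChunkA []
  else []
termination_by cs.length
decreasing_by all_goals (simp only [List.length_drop, List.length_nil]; omega)

def process_text (data : String) : List (List Int) := pvChunkA data.toList

-- ===== PORT B =====
def process_text_alt (data : String) : List (List Int) :=
  let cs := data.toList
  let padded := cs ++ List.replicate ((PySem.Int.mod (-(cs.length : Int)) 16).toNat) '~'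
  (PySem.List.pyRange 0 (padded.length : Int) 16).map
    (fun i => (PySem.List.slice padded (some i) (some (i + 16))).map pvOrd)

-- ===== PRECONDITION & SPEC =====
def Spec_process_text (data : String) (out : List (List Int)) : Prop := out = process_text_alt data
instance (data : String) (out : List (List Int)) : Decidable (Spec_process_text data out) := by unfold Spec_process_text; infer_instance

-- ===== CLAIM (what is proved, stated in full; the proofs are below) =====
def Claim_equal_process_text : Prop := ∀ (data : String), Dom_process_text data → Spec_process_text data (process_text data)

-- ===== LEMMAS AND PROOFS =====

-- the padded character list B builds
def pvPadded (cs : List Char) : List Char :=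
  cs ++ List.replicate ((PySem.Int.mod (-(cs.length : Int)) 16).toNat) '~'

lemma pvPadAmt (n : Nat) : (PySem.Int.mod (-(n : Int)) 16).toNat = (16 - n % 16) % 16 := by
  rw [PySem.Int.mod_eq_emod_of_pos (by norm_num)]
  omega

lemma pvPadded_length (cs : List Char) :
    (pvPadded cs).length = 16 * ((cs.length + 15) / 16) := by
  simp only [pvPadded, List.length_append, List.length_replicate, pvPadAmt]
  omega

-- a 16-window slice is drop-then-take
lemma pvSlice16 (xs : List Char) (k : Nat) :
    PySem.List.slice xs (some ((16 * k : Nat) : Int)) (some (((16 * k : Nat) : Int) + 16)) =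
      (xs.drop (16 * k)).take 16 := by
  rw [PySem.List.slice_toNat _ (by positivity) (by positivity)]
  have h1 : ((16 * k : Nat) : Int).toNat = 16 * k := by omega
  have h2 : (((16 * k : Nat) : Int) + 16).toNat = 16 * k + 16 := by omega
  rw [h1, h2]
  congr 1
  omega

-- L1: on a list of length 16*n, B's range-of-windows pass equals A's chunker
lemma pvFullChunks (n : Nat) : ∀ cs : List Char, cs.length = 16 * n →
    (List.range n).map (fun k => ((cs.drop (16 * k)).take 16).map pvOrd) = pvChunkA cs := by
  induction n with
  | zero =>
      intro cs h
      have : cs = [] := List.eq_nil_of_length_eq_zero (by omega)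
      subst this
      simp [pvChunkA]
  | succ n ih =>
      intro cs h
      have hR : pvChunkA cs = (cs.take 16).map pvOrd :: pvChunkA (cs.drop 16) := by
        rw [pvChunkA]; rw [if_pos (by omega), if_pos (by omega)]
      rw [hR, List.range_succ_eq_map, List.map_cons, List.map_map]
      refine congrArg₂ List.cons (by simp) ?_
      rw [← ih (cs.drop 16) (by rw [List.length_drop, h]; omega)]
      apply List.map_congr_left
      intro k _
      simp only [Function.comp_apply, List.drop_drop]
      congr 3
      omega

-- L2: A returns the same chunks on cs and on B's padded cs
lemma pvChunkA_pad : ∀ cs : List Char, pvChunkA (pvPadded cs) = pvChunkA cs := by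
  intro cs
  induction hn : cs.length using Nat.strong_induction_on generalizing cs with
  | _ n ih =>
  subst hn
  by_cases h0 : 0 < cs.length
  · by_cases h16 : 16 ≤ cs.length
    · have hplen : 16 ≤ (pvPadded cs).length := by
        simp only [pvPadded, List.length_append]; omega
      have hL : pvChunkA (pvPadded cs) =
          ((pvPadded cs).take 16).map pvOrd :: pvChunkA ((pvPadded cs).drop 16) := by
        rw [pvChunkA]; rw [if_pos (by omega), if_pos hplen]
      have hR : pvChunkA cs = (cs.take 16).map pvOrd :: pvChunkA (cs.drop 16) := by
        rw [pvChunkA]; rw [if_pos h0, if_pos h16]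
      have htake : (pvPadded cs).take 16 = cs.take 16 := by
        simp only [pvPadded]
        rw [List.take_append_of_le_length (by omega)]
      have hdrop : (pvPadded cs).drop 16 = pvPadded (cs.drop 16) := by
        simp only [pvPadded]
        rw [List.drop_append_of_le_length (by omega)]
        simp only [List.length_drop, pvPadAmt]
        congr 3
        omega
      rw [hL, hR, htake, hdrop, ih (cs.drop 16).length (by simp; omega) _ rfl]
    · -- 0 < len < 16: padded has length exactly 16, one full chunk
      have hlen : (pvPadded cs).length = 16 := by
        simp only [pvPadded, List.length_append, List.length_replicate, pvPadAmt]; omega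
      have hL : pvChunkA (pvPadded cs) =
          ((pvPadded cs).take 16).map pvOrd :: pvChunkA ((pvPadded cs).drop 16) := by
        rw [pvChunkA]; rw [if_pos (by omega), if_pos (by omega)]
      have hR : pvChunkA cs =
          ((cs ++ List.replicate (16 - cs.length) '~').map pvOrd) :: pvChunkA [] := by
        rw [pvChunkA]; rw [if_pos h0, if_neg h16]
      have hdrop : (pvPadded cs).drop 16 = [] :=
        List.eq_nil_of_length_eq_zero (by simp [hlen])
      have hpad : pvPadded cs = cs ++ List.replicate (16 - cs.length) '~' := by
        unfold pvPadded
        rw [pvPadAmt]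
        have hc : (16 - cs.length % 16) % 16 = 16 - cs.length := by omega
        rw [hc]
      rw [hL, hR, hdrop, List.take_of_length_le (by omega), hpad]
  · have : cs = [] := List.eq_nil_of_length_eq_zero (by omega)
    subst this
    have : pvPadded [] = [] := by simp [pvPadded]
    rw [this]

-- the step-16 range over the padded length is just range n
lemma pvRange16 (n : Nat) :
    PySem.List.pyRange 0 ((16 * n : Nat) : Int) 16 =
      (List.range n).map (fun k => ((16 * k : Nat) : Int)) := by
  rw [PySem.List.pyRange_of_pos _ _ (by norm_num)]
  have hn : (if (0:Int) < ((16 * n : Nat) : Int)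
      then ((((16 * n : Nat) : Int) - 0 + 16 - 1) / 16).toNat else 0) = n := by
    split_ifs with h <;> push_cast at h ⊢ <;> omega
  rw [hn]
  apply List.map_congr_left
  intro k _
  push_cast
  ring

-- ===== VERDICT (by name: the statement is the Claim_ definition above) =====
theorem process_text_spec : Claim_equal_process_text := by
  intro data _
  unfold Spec_process_text process_text process_text_alt
  show pvChunkA data.toList =
    (PySem.List.pyRange 0 ((pvPadded data.toList).length : Int) 16).map
      (fun i => (PySem.List.slice (pvPadded data.toList) (some i) (some (i + 16))).map pvOrd)
  rw [pvPadded_length, pvRange16, List.map_map]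
  have hfun : ((fun i => (PySem.List.slice (pvPadded data.toList) (some i) (some (i + 16))).map pvOrd) ∘
      fun k : Nat => ((16 * k : Nat) : Int)) =
      fun k => (((pvPadded data.toList).drop (16 * k)).take 16).map pvOrd := by
    funext k
    simp only [Function.comp, pvSlice16]
  rw [hfun, pvFullChunks _ _ (pvPadded_length data.toList), pvChunkA_pad]
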